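-- pv_equiv track=rewrite | github.com/pwesp/dl-rad-age | src/dl_rad_age/evaluation.py | filter_runs
-- ===== SOURCE A (Python) =====
-- from   typing import Optional
--
-- def filter_runs(runs: list, include: Optional[list] = None, exclude: Optional[list] = None) -> list:
--
--     if include:
--         for token in include:
--             runs = [x for x in runs if token in x]
--
--     if exclude:
--         for token in exclude:
--             runs = [x for x in runs if token not in x]
--
--     return runs
-- ===== SOURCE B (Python) =====
-- def filter_runs(runs: list, include=None, exclude=None) -> list:
--     include = include or []
--     exclude = exclude or []
--     return [x for x in runs
--             if all(t in x for t in include) and all(t not in x for t in exclude)]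
-- ===== Notes on version B (the rewrite author's own statement) =====
-- stated objective: simpler
-- what changed: Replaces A's per-token list rebuilds (one full pass over the list for every include/exclude token) with a single comprehension over runs whose predicate checks all tokens at once.
import Mathlib
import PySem

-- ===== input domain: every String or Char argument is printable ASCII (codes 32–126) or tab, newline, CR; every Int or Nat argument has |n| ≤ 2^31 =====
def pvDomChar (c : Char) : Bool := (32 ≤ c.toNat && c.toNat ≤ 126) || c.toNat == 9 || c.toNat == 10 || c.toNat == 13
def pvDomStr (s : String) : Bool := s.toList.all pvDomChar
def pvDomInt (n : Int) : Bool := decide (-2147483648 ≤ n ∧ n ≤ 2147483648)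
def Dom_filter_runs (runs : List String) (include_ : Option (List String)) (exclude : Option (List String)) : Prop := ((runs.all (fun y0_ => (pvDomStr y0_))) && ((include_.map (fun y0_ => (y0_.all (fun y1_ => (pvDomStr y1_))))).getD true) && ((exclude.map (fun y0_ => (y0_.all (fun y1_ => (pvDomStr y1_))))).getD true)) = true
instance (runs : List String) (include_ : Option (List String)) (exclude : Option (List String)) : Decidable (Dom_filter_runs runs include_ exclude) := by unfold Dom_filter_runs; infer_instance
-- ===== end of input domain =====

-- B replaces A's per-token list rebuilds with a single comprehension whose predicate checks all tokens at once (objective: simpler).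

-- ===== PORT A =====
-- Python truthiness of an Optional[list]: true iff present and non-empty
def pyTruthyOptList (o : Option (List String)) : Bool :=
  match o with
  | none => false
  | some l => !l.isEmpty

def filter_runs (runs : List String) (include_ : Option (List String)) (exclude : Option (List String)) : List String :=
  let runs1 :=
    if pyTruthyOptList include_ then
      (include_.getD []).foldl (fun rs token => rs.filter (fun x => PySem.Str.isIn token x)) runs
    else runs
  let runs2 :=
    if pyTruthyOptList exclude then
      (exclude.getD []).foldl (fun rs token => rs.filter (fun x => !PySem.Str.isIn token x)) runs1
    else runs1
  runs2

-- ===== PORT B =====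
def filter_runs_alt (runs : List String) (include_ : Option (List String)) (exclude : Option (List String)) : List String :=
  let inc := include_.getD []
  let exc := exclude.getD []
  runs.filter (fun x =>
    inc.all (fun t => PySem.Str.isIn t x) && exc.all (fun t => !PySem.Str.isIn t x))

-- ===== PRECONDITION & SPEC =====
def Spec_filter_runs (runs : List String) (include_ : Option (List String)) (exclude : Option (List String)) (out : List String) : Prop := out = filter_runs_alt runs include_ exclude
instance (runs : List String) (include_ : Option (List String)) (exclude : Option (List String)) (out : List String) : Decidable (Spec_filter_runs runs include_ exclude out) := by unfold Spec_filter_runs; infer_instance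

-- ===== CLAIM (what is proved, stated in full; the proofs are below) =====
def Claim_equal_filter_runs : Prop := ∀ (runs : List String) (include_ : Option (List String)) (exclude : Option (List String)), Dom_filter_runs runs include_ exclude → Spec_filter_runs runs include_ exclude (filter_runs runs include_ exclude)

-- ===== LEMMAS AND PROOFS =====

-- repeated filtering, one token at a time, equals one filter with the conjunction of all tokens
theorem foldl_filter_eq_filter_all (p : String → String → Bool) :
    ∀ (ts rs : List String),
      ts.foldl (fun rs t => rs.filter (fun x => p t x)) rs
        = rs.filter (fun x => ts.all (fun t => p t x)) := by
  intro ts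
  induction ts with
  | nil => intro rs; simp
  | cons t ts ih =>
    intro rs
    simp only [List.foldl_cons, ih, List.filter_filter, List.all_cons]
    exact List.filter_congr (fun x _ => by simp [Bool.and_comm])

-- ===== VERDICT (by name: the statement is the Claim_ definition above) =====
theorem filter_runs_spec : Claim_equal_filter_runs := by
  intro runs include_ exclude _
  unfold Spec_filter_runs filter_runs filter_runs_alt
  rcases include_ with _ | inc <;> rcases exclude with _ | exc <;>
    simp only [pyTruthyOptList, Option.getD_none, Option.getD_some] <;>
    [skip; rcases exc with _ | ⟨e, es⟩; rcases inc with _ | ⟨i, is⟩;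
     rcases inc with _ | ⟨i, is⟩ <;> rcases exc with _ | ⟨e, es⟩] <;>
    simp [foldl_filter_eq_filter_all, List.filter_filter] <;>
    exact List.filter_congr (fun x _ => by simp [Bool.and_comm, Bool.and_left_comm, Bool.and_assoc])
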